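-- pv_equiv track=rewrite | github.com/t0r1n88/Lachesis | motivation/prihogan_dmuaou.py | calc_value_t
-- ===== SOURCE A (Python) =====
-- def calc_value_t(row):
--     """
--     Функция для подсчета значения
--     :return: число
--     """
--     lst_pr = [1,5,9,13,17,21,25,29,33,37]
--     lst_neg = [1,9,25,33]
--     value_forward = 0  # результат
--     for idx, value in enumerate(row,1):
--         if idx in lst_pr:
--             if idx not in lst_neg:
--                 value_forward += value
--             else:
--                 if value == 1:
--                     value_forward += 4
--                 elif value == 2:
--                     value_forward += 3
--                 elif value == 3:
--                     value_forward += 2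
--                 else:
--                     value_forward += 1
--
--
--     return value_forward
-- ===== SOURCE B (Python) =====
-- DIRECT = (4, 12, 16, 20, 28, 36)     # 0-based positions added as-is
-- REMAP = (0, 8, 24, 32)               # 0-based positions remapped 1->4, 2->3, 3->2, else 1
-- REMAP_VALUES = {1: 4, 2: 3, 3: 2}
--
-- def calc_value_t(row):
--     n = len(row)
--     total = 0
--     for pos in DIRECT:
--         if pos < n:
--             total += row[pos]
--     for pos in REMAP:
--         if pos < n:
--             total += REMAP_VALUES.get(row[pos], 1)
--     return total
-- ===== Notes on version B (the rewrite author's own statement) =====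
-- stated objective: faster
-- what changed: Instead of enumerating the whole row and testing each 1-based index against the selected-index lists, B visits only the ten fixed 0-based positions (six added directly, four remapped via {1:4,2:3,3:2}.get(.,1)), each guarded by pos < len(row), so the scan over the rest of the row disappears.
import Mathlib
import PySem

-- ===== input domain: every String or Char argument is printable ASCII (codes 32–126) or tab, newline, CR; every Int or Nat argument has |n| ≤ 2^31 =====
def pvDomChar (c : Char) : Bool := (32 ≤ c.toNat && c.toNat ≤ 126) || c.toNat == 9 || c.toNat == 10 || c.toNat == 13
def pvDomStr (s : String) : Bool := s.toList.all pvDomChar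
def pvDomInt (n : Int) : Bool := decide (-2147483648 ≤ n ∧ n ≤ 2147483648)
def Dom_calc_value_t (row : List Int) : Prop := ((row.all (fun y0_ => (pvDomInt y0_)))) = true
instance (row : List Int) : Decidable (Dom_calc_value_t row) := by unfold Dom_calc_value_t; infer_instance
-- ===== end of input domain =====

-- B replaces A's full enumerate scan with a direct visit of the ten fixed positions (objective: faster on long rows — O(1) positions touched vs O(n) scan).

-- ===== PORT A =====

def calcStep (idx : Int) (value : Int) (acc : Int) : Int :=
  if idx ∈ ([1,5,9,13,17,21,25,29,33,37] : List Int) then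
    if idx ∉ ([1,9,25,33] : List Int) then acc + value
    else if value = 1 then acc + 4
    else if value = 2 then acc + 3
    else if value = 3 then acc + 2
    else acc + 1
  else acc

def calcLoop : Int → List Int → Int → Int
  | _, [], acc => acc
  | i, x :: xs, acc => calcLoop (i+1) xs (calcStep i x acc)

def calc_value_t (row : List Int) : Int := calcLoop 1 row 0


-- ===== PORT B =====
-- row.getD pos 0 is exact here: Source B indexes row[pos] only under the guard pos < len(row)
def remapGet (x : Int) : Int := PySem.Dict.getD (PySem.Dict.ofList [((1:Int),(4:Int)),(2,3),(3,2)]) x 1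

def calc_value_t_alt (row : List Int) : Int :=
  let n := row.length
  let t1 := ([4,12,16,20,28,36] : List Nat).foldl (fun acc pos => if pos < n then acc + row.getD pos 0 else acc) 0
  ([0,8,24,32] : List Nat).foldl (fun acc pos => if pos < n then acc + remapGet (row.getD pos 0) else acc) t1


-- ===== PRECONDITION & SPEC =====
def Spec_calc_value_t (row : List Int) (out : Int) : Prop := out = calc_value_t_alt row
instance (row : List Int) (out : Int) : Decidable (Spec_calc_value_t row out) := by unfold Spec_calc_value_t; infer_instance

-- ===== CLAIM (what is proved, stated in full; the proofs are below) =====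
def Claim_equal_calc_value_t : Prop := ∀ (row : List Int), Dom_calc_value_t row → Spec_calc_value_t row (calc_value_t row)

-- ===== LEMMAS AND PROOFS =====
theorem remapGet_eq (x : Int) : remapGet x = if x = 1 then 4 else if x = 2 then 3 else if x = 3 then 2 else 1 := by
  by_cases h1 : x = 1
  · subst h1; decide
  by_cases h2 : x = 2
  · subst h2; decide
  by_cases h3 : x = 3
  · subst h3; decide
  have e1 : ((1:Int) == x) = false := beq_eq_false_iff_ne.mpr (Ne.symm h1)
  have e2 : ((2:Int) == x) = false := beq_eq_false_iff_ne.mpr (Ne.symm h2)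
  have e3 : ((3:Int) == x) = false := beq_eq_false_iff_ne.mpr (Ne.symm h3)
  rw [remapGet, show PySem.Dict.ofList [((1:Int),(4:Int)),(2,3),(3,2)] = PySem.Dict.mk [((1:Int),(4:Int)),(2,3),(3,2)] from rfl]
  rw [PySem.Dict.getD_eq_get?_getD]
  rw [PySem.Dict.get?_mk_cons, PySem.Dict.get?_mk_cons, PySem.Dict.get?_mk_cons]
  rw [if_neg (by simp [e1]), if_neg (by simp [e2]), if_neg (by simp [e3])]
  simp [h1, h2, h3, show PySem.Dict.mk ([] : List (Int × Int)) = PySem.Dict.empty from rfl]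


theorem calcStep_other (i x acc : Int) (h : i ∉ ([1,5,9,13,17,21,25,29,33,37] : List Int)) :
    calcStep i x acc = acc := by simp [calcStep, h]

theorem calcStep_direct (i x acc : Int) (h1 : i ∈ ([1,5,9,13,17,21,25,29,33,37] : List Int))
    (h2 : i ∉ ([1,9,25,33] : List Int)) : calcStep i x acc = acc + x := by simp [calcStep, h1, h2]

theorem calcStep_remap (i x acc : Int) (h : i ∈ ([1,9,25,33] : List Int)) :
    calcStep i x acc = acc + remapGet x := by
  have h1 : i ∈ ([1,5,9,13,17,21,25,29,33,37] : List Int) := by fin_cases h <;> decide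
  rw [calcStep, if_pos h1, if_neg (not_not_intro h), remapGet_eq]
  split_ifs <;> ring

theorem calcLoop_ge (l : List Int) (i acc : Int) (h : 37 < i) : calcLoop i l acc = acc := by
  induction l generalizing i acc with
  | nil => rfl
  | cons x xs ih =>
    rw [calcLoop, calcStep_other _ _ _ (by simp; omega)]
    exact ih (i+1) acc (by omega)

theorem calcLoop_38 (l : List Int) (acc : Int) : calcLoop 38 l acc = acc :=
  calcLoop_ge l 38 acc (by norm_num)

set_option maxHeartbeats 4000000 in
theorem main_eq (row : List Int) : calc_value_t row = calc_value_t_alt row := by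
  obtain _|⟨x0,row⟩ := row
  · decide
  obtain _|⟨x1,row⟩ := row
  ·
    simp only [calc_value_t, calc_value_t_alt, calcLoop]
    norm_num [calcStep_other, calcStep_direct, calcStep_remap]
    try ring
  obtain _|⟨x2,row⟩ := row
  ·
    simp only [calc_value_t, calc_value_t_alt, calcLoop]
    norm_num [calcStep_other, calcStep_direct, calcStep_remap]
    try ring
  obtain _|⟨x3,row⟩ := row
  ·
    simp only [calc_value_t, calc_value_t_alt, calcLoop]
    norm_num [calcStep_other, calcStep_direct, calcStep_remap]
    try ring
  obtain _|⟨x4,row⟩ := row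
  ·
    simp only [calc_value_t, calc_value_t_alt, calcLoop]
    norm_num [calcStep_other, calcStep_direct, calcStep_remap]
    try ring
  obtain _|⟨x5,row⟩ := row
  ·
    simp only [calc_value_t, calc_value_t_alt, calcLoop]
    norm_num [calcStep_other, calcStep_direct, calcStep_remap]
    try ring
  obtain _|⟨x6,row⟩ := row
  ·
    simp only [calc_value_t, calc_value_t_alt, calcLoop]
    norm_num [calcStep_other, calcStep_direct, calcStep_remap]
    try ring
  obtain _|⟨x7,row⟩ := row
  ·
    simp only [calc_value_t, calc_value_t_alt, calcLoop]
    norm_num [calcStep_other, calcStep_direct, calcStep_remap]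
    try ring
  obtain _|⟨x8,row⟩ := row
  ·
    simp only [calc_value_t, calc_value_t_alt, calcLoop]
    norm_num [calcStep_other, calcStep_direct, calcStep_remap]
    try ring
  obtain _|⟨x9,row⟩ := row
  ·
    simp only [calc_value_t, calc_value_t_alt, calcLoop]
    norm_num [calcStep_other, calcStep_direct, calcStep_remap]
    try ring
  obtain _|⟨x10,row⟩ := row
  ·
    simp only [calc_value_t, calc_value_t_alt, calcLoop]
    norm_num [calcStep_other, calcStep_direct, calcStep_remap]
    try ring
  obtain _|⟨x11,row⟩ := row
  ·
    simp only [calc_value_t, calc_value_t_alt, calcLoop]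
    norm_num [calcStep_other, calcStep_direct, calcStep_remap]
    try ring
  obtain _|⟨x12,row⟩ := row
  ·
    simp only [calc_value_t, calc_value_t_alt, calcLoop]
    norm_num [calcStep_other, calcStep_direct, calcStep_remap]
    try ring
  obtain _|⟨x13,row⟩ := row
  ·
    simp only [calc_value_t, calc_value_t_alt, calcLoop]
    norm_num [calcStep_other, calcStep_direct, calcStep_remap]
    try ring
  obtain _|⟨x14,row⟩ := row
  ·
    simp only [calc_value_t, calc_value_t_alt, calcLoop]
    norm_num [calcStep_other, calcStep_direct, calcStep_remap]
    try ring
  obtain _|⟨x15,row⟩ := row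
  ·
    simp only [calc_value_t, calc_value_t_alt, calcLoop]
    norm_num [calcStep_other, calcStep_direct, calcStep_remap]
    try ring
  obtain _|⟨x16,row⟩ := row
  ·
    simp only [calc_value_t, calc_value_t_alt, calcLoop]
    norm_num [calcStep_other, calcStep_direct, calcStep_remap]
    try ring
  obtain _|⟨x17,row⟩ := row
  ·
    simp only [calc_value_t, calc_value_t_alt, calcLoop]
    norm_num [calcStep_other, calcStep_direct, calcStep_remap]
    try ring
  obtain _|⟨x18,row⟩ := row
  ·
    simp only [calc_value_t, calc_value_t_alt, calcLoop]
    norm_num [calcStep_other, calcStep_direct, calcStep_remap]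
    try ring
  obtain _|⟨x19,row⟩ := row
  ·
    simp only [calc_value_t, calc_value_t_alt, calcLoop]
    norm_num [calcStep_other, calcStep_direct, calcStep_remap]
    try ring
  obtain _|⟨x20,row⟩ := row
  ·
    simp only [calc_value_t, calc_value_t_alt, calcLoop]
    norm_num [calcStep_other, calcStep_direct, calcStep_remap]
    try ring
  obtain _|⟨x21,row⟩ := row
  ·
    simp only [calc_value_t, calc_value_t_alt, calcLoop]
    norm_num [calcStep_other, calcStep_direct, calcStep_remap]
    try ring
  obtain _|⟨x22,row⟩ := row
  ·
    simp only [calc_value_t, calc_value_t_alt, calcLoop]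
    norm_num [calcStep_other, calcStep_direct, calcStep_remap]
    try ring
  obtain _|⟨x23,row⟩ := row
  ·
    simp only [calc_value_t, calc_value_t_alt, calcLoop]
    norm_num [calcStep_other, calcStep_direct, calcStep_remap]
    try ring
  obtain _|⟨x24,row⟩ := row
  ·
    simp only [calc_value_t, calc_value_t_alt, calcLoop]
    norm_num [calcStep_other, calcStep_direct, calcStep_remap]
    try ring
  obtain _|⟨x25,row⟩ := row
  ·
    simp only [calc_value_t, calc_value_t_alt, calcLoop]
    norm_num [calcStep_other, calcStep_direct, calcStep_remap]
    try ring
  obtain _|⟨x26,row⟩ := row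
  ·
    simp only [calc_value_t, calc_value_t_alt, calcLoop]
    norm_num [calcStep_other, calcStep_direct, calcStep_remap]
    try ring
  obtain _|⟨x27,row⟩ := row
  ·
    simp only [calc_value_t, calc_value_t_alt, calcLoop]
    norm_num [calcStep_other, calcStep_direct, calcStep_remap]
    try ring
  obtain _|⟨x28,row⟩ := row
  ·
    simp only [calc_value_t, calc_value_t_alt, calcLoop]
    norm_num [calcStep_other, calcStep_direct, calcStep_remap]
    try ring
  obtain _|⟨x29,row⟩ := row
  ·
    simp only [calc_value_t, calc_value_t_alt, calcLoop]
    norm_num [calcStep_other, calcStep_direct, calcStep_remap]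
    try ring
  obtain _|⟨x30,row⟩ := row
  ·
    simp only [calc_value_t, calc_value_t_alt, calcLoop]
    norm_num [calcStep_other, calcStep_direct, calcStep_remap]
    try ring
  obtain _|⟨x31,row⟩ := row
  ·
    simp only [calc_value_t, calc_value_t_alt, calcLoop]
    norm_num [calcStep_other, calcStep_direct, calcStep_remap]
    try ring
  obtain _|⟨x32,row⟩ := row
  ·
    simp only [calc_value_t, calc_value_t_alt, calcLoop]
    norm_num [calcStep_other, calcStep_direct, calcStep_remap]
    try ring
  obtain _|⟨x33,row⟩ := row
  ·
    simp only [calc_value_t, calc_value_t_alt, calcLoop]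
    norm_num [calcStep_other, calcStep_direct, calcStep_remap]
    try ring
  obtain _|⟨x34,row⟩ := row
  ·
    simp only [calc_value_t, calc_value_t_alt, calcLoop]
    norm_num [calcStep_other, calcStep_direct, calcStep_remap]
    try ring
  obtain _|⟨x35,row⟩ := row
  ·
    simp only [calc_value_t, calc_value_t_alt, calcLoop]
    norm_num [calcStep_other, calcStep_direct, calcStep_remap]
    try ring
  obtain _|⟨x36,row⟩ := row
  ·
    simp only [calc_value_t, calc_value_t_alt, calcLoop]
    norm_num [calcStep_other, calcStep_direct, calcStep_remap]
    try ring
  have hg : ∀ k : Nat, k < 37 → k < (x0::x1::x2::x3::x4::x5::x6::x7::x8::x9::x10::x11::x12::x13::x14::x15::x16::x17::x18::x19::x20::x21::x22::x23::x24::x25::x26::x27::x28::x29::x30::x31::x32::x33::x34::x35::x36::row).length := by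
    intro k hk; simp only [List.length_cons]; omega
  simp only [calc_value_t, calc_value_t_alt, calcLoop]
  norm_num [calcStep_other, calcStep_direct, calcStep_remap, calcLoop_38, hg]
  try ring

-- ===== VERDICT (by name: the statement is the Claim_ definition above) =====
theorem calc_value_t_spec : Claim_equal_calc_value_t := by
  intro row _
  exact main_eq row
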